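-- pv_equiv track=rewrite | github.com/ComebaLL/infoSecurity | core_err/core_err.py | detect_and_correct
-- ===== SOURCE A (Python) =====
-- def get_parity_positions(n):
--     positions = []
--     i = 0
--     while (2 ** i) <= n:
--         positions.append(2 ** i)
--         i += 1
--     return positions
--
-- def detect_and_correct(encoded_char):
--     n = len(encoded_char)
--     parity_positions = get_parity_positions(n)
--     error_pos = 0
--     for p in parity_positions:
--         parity_sum = 0
--         for i in range(1, n + 1):
--             if i & p and encoded_char[i - 1] == '1':
--                 parity_sum ^= 1
--         if parity_sum == 1:
--             error_pos += p
--     if error_pos: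
--         encoded_char = list(encoded_char)
--         encoded_char[error_pos - 1] = '1' if encoded_char[error_pos - 1] == '0' else '0'
--         return ''.join(encoded_char), error_pos
--     return encoded_char, None
-- ===== SOURCE B (Python) =====
-- def detect_and_correct(encoded_char):
--     # One pass: the Hamming syndrome is the XOR of the one-based positions of set bits.
--     syndrome = 0
--     for i, c in enumerate(encoded_char, 1):
--         if c == '1':
--             syndrome ^= i
--     if syndrome == 0:
--         return encoded_char, None
--     bits = list(encoded_char)
--     bits[syndrome - 1] = '1' if bits[syndrome - 1] == '0' else '0'
--     return ''.join(bits), syndrome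
-- ===== Notes on version B (the rewrite author's own statement) =====
-- stated objective: faster
-- what changed: Replaces A's per-parity-position passes (for each power of two <= n, a full scan of the string) by a single pass that XORs the one-based positions of set bits, which yields the error syndrome directly.
import Mathlib
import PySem

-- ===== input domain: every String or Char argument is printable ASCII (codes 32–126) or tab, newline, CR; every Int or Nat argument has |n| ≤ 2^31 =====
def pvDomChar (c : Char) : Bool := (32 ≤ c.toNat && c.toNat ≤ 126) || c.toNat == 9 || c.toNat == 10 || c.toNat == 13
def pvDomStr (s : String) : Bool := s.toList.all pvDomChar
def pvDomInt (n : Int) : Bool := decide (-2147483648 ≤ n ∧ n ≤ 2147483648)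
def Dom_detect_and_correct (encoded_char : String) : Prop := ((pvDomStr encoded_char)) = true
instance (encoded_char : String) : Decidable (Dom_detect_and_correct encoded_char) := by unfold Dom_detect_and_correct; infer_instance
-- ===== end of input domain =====

-- B replaces A's nested parity-position scans by a single XOR pass over the bit positions (alternative algorithm; return values proved equal).


-- ===== PORT A =====
-- get_parity_positions: while 2**i <= n collect 2**i
def pvGppAux (n : Nat) (i : Nat) : List Nat :=
  if 2 ^ i ≤ n then 2 ^ i :: pvGppAux n (i + 1) else []
termination_by n + 1 - i
decreasing_by
  have : i < 2 ^ i := Nat.lt_two_pow_self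
  omega

-- the inner 'for i in range(1, n+1)' loop computing parity_sum for one parity position p
def pvParitySum (cs : List Char) (p : Nat) : Nat :=
  (List.range cs.length).foldl
    (fun s i => if ((i + 1) &&& p != 0) && (cs.getD i ' ' == '1') then s ^^^ 1 else s) 0

-- the outer 'for p in parity_positions' loop accumulating error_pos
def pvErrorPosA (cs : List Char) : Nat :=
  (pvGppAux cs.length 0).foldl (fun ep p => if pvParitySum cs p == 1 then ep + p else ep) 0

-- the flip-and-join block (Python raises IndexError when pos > len; Pre_ excludes that,
-- here List.set / List.getD are no-ops there)
def pvFlipA (cs : List Char) (pos : Nat) : List Char :=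
  cs.set (pos - 1) (if cs.getD (pos - 1) ' ' == '0' then '1' else '0')

def detect_and_correct (encoded_char : String) : String × Option Int :=
  if pvErrorPosA encoded_char.toList ≠ 0 then
    (String.ofList (pvFlipA encoded_char.toList (pvErrorPosA encoded_char.toList)),
      some (pvErrorPosA encoded_char.toList : Int))
  else (encoded_char, none)

-- ===== PORT B =====
-- single pass: XOR of the one-based positions of set bits (Source B's enumerate loop)
def pvSyn (cs : List Char) : Nat :=
  (cs.zipIdx 1).foldl (fun s ci => if ci.1 == '1' then s ^^^ ci.2 else s) 0

def pvFlipB (bits : List Char) (pos : Nat) : List Char :=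
  bits.set (pos - 1) (if bits.getD (pos - 1) ' ' == '0' then '1' else '0')

def detect_and_correct_alt (encoded_char : String) : String × Option Int :=
  if pvSyn encoded_char.toList == 0 then (encoded_char, none)
  else
    (String.ofList (pvFlipB encoded_char.toList (pvSyn encoded_char.toList)),
      some (pvSyn encoded_char.toList : Int))

-- ===== PRECONDITION & SPEC =====
-- Pre_ excludes exactly the inputs where Python A raises IndexError: those whose
-- error syndrome (XOR of the one-based positions of set bits) exceeds the string length.
def Pre_detect_and_correct (encoded_char : String) : Prop :=
  pvSyn encoded_char.toList ≤ encoded_char.toList.length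
instance (encoded_char : String) : Decidable (Pre_detect_and_correct encoded_char) := by
  unfold Pre_detect_and_correct; infer_instance

def pvWitness_detect_and_correct : String := "1100110"

def Spec_detect_and_correct (encoded_char : String) (out : String × Option Int) : Prop := out = detect_and_correct_alt encoded_char
instance (encoded_char : String) (out : String × Option Int) : Decidable (Spec_detect_and_correct encoded_char out) := by unfold Spec_detect_and_correct; infer_instance

-- ===== CLAIM (what is proved, stated in full; the proofs are below) =====
def Claim_equal_detect_and_correct : Prop := ∀ (encoded_char : String), Dom_detect_and_correct encoded_char → Pre_detect_and_correct encoded_char → Spec_detect_and_correct encoded_char (detect_and_correct encoded_char)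

-- ===== LEMMAS AND PROOFS =====

theorem pvSyn_append (l : List Char) (c : Char) :
    pvSyn (l ++ [c]) = pvSyn l ^^^ (if c == '1' then l.length + 1 else 0) := by
  unfold pvSyn
  rw [List.zipIdx_append, List.foldl_append]
  simp only [List.zipIdx, List.foldl_cons, List.foldl_nil]
  by_cases h : c == '1'
  · rw [if_pos h, if_pos h, Nat.add_comm 1 l.length]
  · rw [if_neg h, if_neg h, Nat.xor_zero]

-- every set bit of the syndrome is a power of two not exceeding the length
theorem pvSyn_bits (l : List Char) : ∀ j, (pvSyn l).testBit j = true → 2 ^ j ≤ l.length := by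
  induction l using List.reverseRecOn with
  | nil => intro j h; simp [pvSyn] at h
  | append_singleton t c ih =>
    intro j h
    rw [pvSyn_append, Nat.testBit_xor] at h
    have hor : (pvSyn t).testBit j = true ∨ ((if c = '1' then t.length + 1 else 0).testBit j) = true := by
      cases h1 : (pvSyn t).testBit j with
      | true => exact Or.inl rfl
      | false => rw [h1] at h; simp at h; exact Or.inr h
    rcases hor with h' | h'
    · have := ih j h'
      simp only [List.length_append, List.length_cons, List.length_nil]
      omega
    · by_cases hc : c = '1'
      · rw [if_pos hc] at h'
        have := Nat.ge_two_pow_of_testBit h'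
        simp only [List.length_append, List.length_cons, List.length_nil]
        omega
      · rw [if_neg hc] at h' ; simp [Nat.zero_testBit] at h' 

theorem pvLtTwoPowOfBits (S i : Nat) (h : ∀ j, S.testBit j = true → j < i) : S < 2 ^ i := by
  induction i generalizing S with
  | zero =>
    have : S = 0 := Nat.eq_of_testBit_eq (fun j => by
      rw [Nat.zero_testBit]
      cases hj : S.testBit j with
      | false => rfl
      | true => exact absurd (h j hj) (by omega))
    omega
  | succ i ih =>
    have h2 : S / 2 < 2 ^ i := ih (S / 2) (fun j hj => by
      have := h (j + 1) (by rw [Nat.testBit_add_one]; exact hj)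
      omega)
    have := Nat.div_add_mod S 2
    have hm : S % 2 < 2 := Nat.mod_lt _ (by omega)
    have : 2 ^ (i + 1) = 2 ^ i * 2 := pow_succ 2 i
    omega

theorem pvParity_eq (l : List Char) (j : Nat) :
    pvParitySum l (2 ^ j) = if (pvSyn l).testBit j then 1 else 0 := by
  induction l using List.reverseRecOn with
  | nil => simp [pvParitySum, pvSyn]
  | append_singleton t c ih =>
    unfold pvParitySum
    simp only [List.length_append, List.length_cons, List.length_nil]
    rw [List.range_succ, List.foldl_append]
    have h1 : (List.range t.length).foldl
        (fun s i => if ((i + 1) &&& 2 ^ j != 0) && ((t ++ [c]).getD i ' ' == '1') then s ^^^ 1 else s) 0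
        = pvParitySum t (2 ^ j) := by
      unfold pvParitySum
      apply PySem.List.foldl_congr_mem
      intro acc x hx
      rw [List.getD_append _ _ _ _ (List.mem_range.mp hx)]
    rw [h1, ih]
    simp only [List.foldl_cons, List.foldl_nil]
    have h2 : (t ++ [c]).getD t.length ' ' = c := by
      rw [List.getD_append_right _ _ _ _ (le_refl _)]
      simp
    have h3 : ((t.length + 1) &&& 2 ^ j != 0) = (t.length + 1).testBit j := by
      rw [Nat.and_two_pow]
      cases hb : (t.length + 1).testBit j <;> simp
    rw [h2, h3, pvSyn_append, Nat.testBit_xor]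
    cases hc : (c == '1') <;> cases hb : (t.length + 1).testBit j <;>
      cases hs : (pvSyn t).testBit j <;>
        simp [hb, Nat.zero_testBit]

theorem pvSyn_lt (l : List Char) (i : Nat) (hc : l.length < 2 ^ i) : pvSyn l < 2 ^ i := by
  refine pvLtTwoPowOfBits _ _ (fun j hj => ?_)
  have h1 := pvSyn_bits l j hj
  have : 2 ^ j < 2 ^ i := by omega
  exact (Nat.pow_lt_pow_iff_right (by omega)).mp this

theorem pvOuterFold (l : List Char) :
    ∀ (fuel i a : Nat), l.length + 1 - i ≤ fuel →
      (pvGppAux l.length i).foldl (fun ep p => if pvParitySum l p == 1 then ep + p else ep) a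
        = a + 2 ^ i * (pvSyn l / 2 ^ i) := by
  intro fuel
  induction fuel with
  | zero =>
    intro i a h
    have hi : i < 2 ^ i := Nat.lt_two_pow_self
    rw [pvGppAux, if_neg (by omega)]
    have hS : pvSyn l < 2 ^ i := pvSyn_lt l i (by omega)
    simp [Nat.div_eq_of_lt hS]
  | succ f ih =>
    intro i a h
    rw [pvGppAux]
    by_cases hc : 2 ^ i ≤ l.length
    · rw [if_pos hc]
      simp only [List.foldl_cons]
      rw [pvParity_eq, ih (i + 1) _ (by omega)]
      have hdd : pvSyn l / 2 ^ i / 2 = pvSyn l / 2 ^ (i + 1) := by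
        rw [Nat.div_div_eq_div_mul, ← pow_succ]
      have hq := Nat.div_add_mod (pvSyn l / 2 ^ i) 2
      have hmod : pvSyn l / 2 ^ i % 2 < 2 := Nat.mod_lt _ (by omega)
      have hbit : (pvSyn l).testBit i = decide (pvSyn l / 2 ^ i % 2 = 1) :=
        Nat.testBit_eq_decide_div_mod_eq
      have hp : 2 ^ (i + 1) = 2 ^ i * 2 := pow_succ 2 i
      cases htb : (pvSyn l).testBit i with
      | true =>
        rw [htb] at hbit
        have hm1 : pvSyn l / 2 ^ i % 2 = 1 := of_decide_eq_true hbit.symm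
        have hq' : 2 * (pvSyn l / 2 ^ (i + 1)) + 1 = pvSyn l / 2 ^ i := by
          rw [← hdd]; omega
        rw [if_pos rfl]
        simp only [beq_self_eq_true, if_true]
        rw [← hq', hp]; ring
      | false =>
        rw [htb] at hbit
        have hm1 : pvSyn l / 2 ^ i % 2 = 0 := by
          by_contra hh
          have : pvSyn l / 2 ^ i % 2 = 1 := by omega
          rw [this] at hbit; simp at hbit
        have hq' : 2 * (pvSyn l / 2 ^ (i + 1)) = pvSyn l / 2 ^ i := by
          rw [← hdd]; omega
        rw [if_neg (by decide : ¬ (((if false = true then (1 : Nat) else 0) == 1) = true))]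
        rw [← hq', hp]; ring
    · rw [if_neg hc]
      have hS : pvSyn l < 2 ^ i := pvSyn_lt l i (by omega)
      simp [Nat.div_eq_of_lt hS]

theorem pvErrorPosA_eq (cs : List Char) : pvErrorPosA cs = pvSyn cs := by
  have := pvOuterFold cs (cs.length + 1) 0 0 (by omega)
  simpa [pvErrorPosA] using this

theorem pvFlip_eq : pvFlipA = pvFlipB := rfl

-- ===== VERDICT (by name: the statement is the Claim_ definition above) =====
theorem detect_and_correct_spec : Claim_equal_detect_and_correct := by
  intro s _ _
  unfold Spec_detect_and_correct detect_and_correct detect_and_correct_alt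
  rw [pvErrorPosA_eq, pvFlip_eq]
  by_cases h : pvSyn s.toList = 0
  · simp [h]
  · simp [h]
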